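-- pv_equiv track=rewrite | github.com/RyanHeise1/UOregon-CIS | cis210/p7/p7a_majors.py | majors_analysis
-- ===== SOURCE A (Python) =====
-- def majors_analysis(majorsli):
--     '''
--     (majorsli: List) -> List
--
--     This function takes in a list of majors and determines the most
--     frequent occuring majors
--
--     >>> majors_analysis(['CIS', 'SDSC', 'CIS', 'EXPL', 'PBA',
--                          'CIS', 'CIS', 'PHYS', 'DSCI'])
--     (['CIS'], 6)
--     '''
--     num = 0
--     majors_ct = len(set(majorsli))
--     majors_mode = majorsli[0]
--
--     # finds the mode
--     for items in majorsli:
--         curr_freq = majorsli.count(items)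
--         if curr_freq > num:
--             num = curr_freq
--             majors_mode = items
--
--     return majors_mode, majors_ct
-- ===== SOURCE B (Python) =====
-- def majors_analysis(majorsli):
--     count = {}
--     for m in majorsli:
--         count[m] = count.get(m, 0) + 1
--     num = max(count.values())
--     majors_mode = next(m for m in majorsli if count[m] == num)
--     return majors_mode, len(count)
-- ===== Notes on version B (the rewrite author's own statement) =====
-- stated objective: faster
-- what changed: Replace the quadratic loop calling majorsli.count(item) for every element (plus a separate set() pass) by one frequency-dict-building pass, then take the maximum of the dict's values and scan the original list for the FIRST element whose count equals that maximum (a first-match search instead of A's running strict-max update), returning len(count) as the unique-major count.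
import Mathlib
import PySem

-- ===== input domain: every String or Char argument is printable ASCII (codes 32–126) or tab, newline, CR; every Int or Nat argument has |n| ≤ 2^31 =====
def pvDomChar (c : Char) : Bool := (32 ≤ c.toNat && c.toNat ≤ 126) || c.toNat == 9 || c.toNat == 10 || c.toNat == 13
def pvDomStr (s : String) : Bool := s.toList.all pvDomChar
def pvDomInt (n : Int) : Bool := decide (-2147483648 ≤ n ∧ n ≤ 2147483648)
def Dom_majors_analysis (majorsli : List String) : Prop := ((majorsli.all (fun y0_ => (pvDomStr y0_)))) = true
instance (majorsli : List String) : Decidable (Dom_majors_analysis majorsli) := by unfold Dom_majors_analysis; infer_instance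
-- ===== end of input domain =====

-- B replaces A's quadratic majorsli.count-in-a-loop (plus a set() pass) by one frequency-dict
-- build, a max over the dict values, and a first-match scan: faster (O(n) vs O(n^2) passes).


-- ===== PORT A =====
def majors_analysis (majorsli : List String) : String × Int :=
  -- num = 0; majors_ct = len(set(majorsli)); majors_mode = majorsli[0]
  let majors_ct : Int := PySem.Set.len (PySem.Set.ofList majorsli)
  match PySem.List.pyGet? majorsli 0 with
  | none => ("", 0)   -- IndexError on the empty list; excluded by Pre_
  | some majors_mode0 =>
    -- for items in majorsli: curr_freq = majorsli.count(items); if curr_freq > num: …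
    let r := majorsli.foldl (fun (acc : Int × String) items =>
      let curr_freq : Int := PySem.List.count majorsli items
      if curr_freq > acc.1 then (curr_freq, items) else acc) ((0 : Int), majors_mode0)
    (r.2, majors_ct)

-- ===== PORT B =====
def majors_analysis_alt (majorsli : List String) : String × Int :=
  -- count = {}; for m in majorsli: count[m] = count.get(m, 0) + 1
  let count : PySem.Dict String Int :=
    majorsli.foldl (fun d m => d.modify m 0 (· + 1)) PySem.Dict.empty
  -- num = max(count.values())
  match PySem.List.max? count.values (fun v => v) with
  | none => ("", 0)   -- ValueError if count is empty (empty input); excluded by Pre_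
  | some num =>
    -- majors_mode = next(m for m in majorsli if count[m] == num)
    match majorsli.find? (fun m => count.getD m 0 == num) with
    | none => ("", 0)   -- unreachable: some element attains the maximum count
    | some majors_mode => (majors_mode, (count.size : Int))

-- ===== PRECONDITION & SPEC =====
-- Pre_ excludes only the empty list, on which both Pythons raise (A: IndexError, B: ValueError).
def Pre_majors_analysis (majorsli : List String) : Prop := majorsli ≠ []
instance (majorsli : List String) : Decidable (Pre_majors_analysis majorsli) := by unfold Pre_majors_analysis; infer_instance
def pvWitness_majors_analysis : List String := ["CIS", "PHYS", "CIS"]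

def Spec_majors_analysis (majorsli : List String) (out : String × Int) : Prop := out = majors_analysis_alt majorsli
instance (majorsli : List String) (out : String × Int) : Decidable (Spec_majors_analysis majorsli out) := by unfold Spec_majors_analysis; infer_instance

-- ===== CLAIM (what is proved, stated in full; the proofs are below) =====
def Claim_equal_majors_analysis : Prop := ∀ (majorsli : List String), Dom_majors_analysis majorsli → Pre_majors_analysis majorsli → Spec_majors_analysis majorsli (majors_analysis majorsli)

-- ===== LEMMAS AND PROOFS =====

-- Characterisation of A's running strict-max fold: the result bounds every count,
-- and (when it moved past the initial accumulator) its mode is the FIRST element of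
-- the list whose count reaches the final maximum.
lemma foldA_char (cnt : String → Int) (xs : List String) : ∀ (acc : Int × String),
    (∀ x ∈ xs, cnt x ≤ (xs.foldl (fun a x => if cnt x > a.1 then (cnt x, x) else a) acc).1) ∧
    acc.1 ≤ (xs.foldl (fun a x => if cnt x > a.1 then (cnt x, x) else a) acc).1 ∧
    (acc.1 < (xs.foldl (fun a x => if cnt x > a.1 then (cnt x, x) else a) acc).1 →
      xs.find? (fun x => decide ((xs.foldl (fun a x => if cnt x > a.1 then (cnt x, x) else a) acc).1 ≤ cnt x))
        = some (xs.foldl (fun a x => if cnt x > a.1 then (cnt x, x) else a) acc).2) ∧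
    (¬ acc.1 < (xs.foldl (fun a x => if cnt x > a.1 then (cnt x, x) else a) acc).1 →
      (xs.foldl (fun a x => if cnt x > a.1 then (cnt x, x) else a) acc) = acc) := by
  induction xs with
  | nil => intro acc; simp
  | cons x t ih =>
    intro acc
    by_cases hx : cnt x > acc.1
    · simp only [List.foldl_cons, if_pos hx]
      obtain ⟨h1, h2, h3, h4⟩ := ih (cnt x, x)
      by_cases hmove : (cnt x) < (t.foldl (fun a x => if cnt x > a.1 then (cnt x, x) else a) (cnt x, x)).1
      · refine ⟨?_, ?_, ?_, ?_⟩
        · intro y hy; rcases List.mem_cons.mp hy with rfl | hyt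
          · exact le_of_lt hmove
          · exact h1 y hyt
        · exact le_trans (le_of_lt hx) h2
        · intro _
          rw [List.find?_cons]
          have : ¬ ((t.foldl (fun a x => if cnt x > a.1 then (cnt x, x) else a) (cnt x, x)).1 ≤ cnt x) :=
            not_le.mpr hmove
          simp only [this, decide_false]
          exact h3 hmove
        · intro hcon; exact absurd (lt_trans hx hmove) hcon
      · have heq := h4 hmove
        refine ⟨?_, ?_, ?_, ?_⟩
        · intro y hy; rcases List.mem_cons.mp hy with rfl | hyt
          · rw [heq]
          · exact h1 y hyt
        · rw [heq]; exact le_of_lt hx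
        · intro _
          rw [List.find?_cons, heq]
          simp
        · intro hcon; rw [heq] at hcon; exact absurd hx hcon
    · simp only [List.foldl_cons, if_neg hx]
      obtain ⟨h1, h2, h3, h4⟩ := ih acc
      refine ⟨?_, ?_, ?_, ?_⟩
      · intro y hy; rcases List.mem_cons.mp hy with rfl | hyt
        · exact le_trans (le_of_not_gt hx) h2
        · exact h1 y hyt
      · exact h2
      · intro hmove
        rw [List.find?_cons]
        have : ¬ ((t.foldl (fun a x => if cnt x > a.1 then (cnt x, x) else a) acc).1 ≤ cnt x) :=
          not_le.mpr (lt_of_le_of_lt (le_of_not_gt hx) hmove)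
        simp only [this, decide_false]
        exact h3 hmove
      · exact h4

-- find? only depends on the predicate's values on the list's elements
lemma find?_congr_mem {α : Type} (xs : List α) (p q : α → Bool)
    (h : ∀ x ∈ xs, p x = q x) : xs.find? p = xs.find? q := by
  induction xs with
  | nil => rfl
  | cons x t ih =>
    rw [List.find?_cons, List.find?_cons, h x (List.mem_cons_self)]
    cases q x
    · exact ih (fun y hy => h y (List.mem_cons_of_mem x hy))
    · rfl

-- ===== VERDICT (by name: the statement is the Claim_ definition above) =====
theorem majors_analysis_spec : Claim_equal_majors_analysis := by
  intro xs _ hpre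
  unfold Spec_majors_analysis majors_analysis majors_analysis_alt
  obtain ⟨h, t, rfl⟩ : ∃ h t, xs = h :: t := by
    cases xs with
    | nil => exact absurd rfl hpre
    | cons a b => exact ⟨a, b, rfl⟩
  set xs := h :: t with hxs
  have hget : PySem.List.pyGet? xs 0 = some h := by
    simp [PySem.List.pyGet?, PySem.List.pyIdx?, hxs]
  rw [← PySem.Dict.counter_eq_foldl]
  simp only [hget]
  -- the count function A uses
  set cnt : String → Int := fun v => PySem.List.count xs v with hcnt
  set r := xs.foldl (fun (a : Int × String) x => if cnt x > a.1 then (cnt x, x) else a) ((0 : Int), h) with hr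
  obtain ⟨hbound, _, hfind, _⟩ := foldA_char cnt xs ((0 : Int), h)
  have hmem : h ∈ xs := by rw [hxs]; exact List.mem_cons_self
  have hpos : (0 : Int) < cnt h := by
    simp only [hcnt, PySem.List.count_eq]
    exact_mod_cast Nat.pos_of_ne_zero (by simpa [List.count_eq_zero] using hmem)
  have hmove : (0 : Int) < r.1 := lt_of_lt_of_le hpos (hbound h hmem)
  have hfound := hfind hmove
  -- values of the counter
  have hvals : (PySem.Dict.counter xs (κ := String)).values
      = (PySem.Set.ofList xs).map cnt := by
    show ((PySem.Dict.counter xs (κ := String)).items).map (·.2) = _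
    rw [PySem.Dict.items_counter, List.map_map]
    apply List.map_congr_left
    intro k _
    simp [hcnt, PySem.List.count_eq]
  -- h is in the set, so values is nonempty and max? returns some num
  have hset : h ∈ PySem.Set.ofList xs := by
    rw [PySem.Set.mem_ofList]; exact hmem
  have hvne : (PySem.Dict.counter xs (κ := String)).values ≠ [] := by
    rw [hvals]
    intro hc
    rw [List.map_eq_nil_iff.mp hc] at hset
    simp at hset
  obtain ⟨num, hnum⟩ : ∃ num, PySem.List.max? (PySem.Dict.counter xs (κ := String)).values (fun v => v) = some num := by
    cases hmax : PySem.List.max? (PySem.Dict.counter xs (κ := String)).values (fun v => v) with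
    | none => exact absurd ((PySem.List.max?_eq_none_iff _ _).mp hmax) hvne
    | some m => exact ⟨m, rfl⟩
  -- num = r.1
  have hnum_mem := PySem.List.max?_mem hnum
  have hnum_max := PySem.List.max?_isMax hnum
  have hnum_eq : num = r.1 := by
    -- num is some element's count, hence ≤ r.1
    rw [hvals] at hnum_mem hnum_max
    obtain ⟨y, hy, hyv⟩ := List.mem_map.mp hnum_mem
    have hyxs : y ∈ xs := (PySem.Set.mem_ofList _ _).mp hy
    have h1 : num ≤ r.1 := hyv ▸ hbound y hyxs
    -- r.2 attains r.1 and its count is among values, hence r.1 ≤ num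
    have hr2mem : r.2 ∈ xs := List.mem_of_find?_eq_some hfound
    have hr2p : r.1 ≤ cnt r.2 := by
      have := List.find?_some hfound
      simpa using this
    have h2 : cnt r.2 ≤ num :=
      hnum_max (cnt r.2) (List.mem_map.mpr ⟨r.2, (PySem.Set.mem_ofList _ _).mpr hr2mem, rfl⟩)
    omega
  -- B's find? equals A's find?
  have hfindB : xs.find? (fun m => (PySem.Dict.counter xs (κ := String)).getD m 0 == num)
      = some r.2 := by
    rw [find?_congr_mem xs _ (fun x => decide (r.1 ≤ cnt x))]
    · exact hfound
    · intro x hxmem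
      have hle : cnt x ≤ r.1 := hbound x hxmem
      have : (PySem.Dict.counter xs (κ := String)).getD x 0 = cnt x := by
        rw [PySem.Dict.getD_counter]; simp [hcnt, PySem.List.count_eq]
      rw [this, hnum_eq]
      by_cases hc : cnt x = r.1
      · simp [hc]
      · simp [hc, not_le.mpr (lt_of_le_of_ne hle hc)]
  rw [hnum]
  simp only [hfindB]
  -- assemble: modes agree (both r.2), counts agree (Set.len vs Dict.size)
  refine Prod.ext rfl ?_
  show PySem.Set.len (PySem.Set.ofList xs) = ((PySem.Dict.counter xs (κ := String)).size : Int)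
  simp [PySem.Set.len, PySem.Dict.size, PySem.Dict.items_counter]
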